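-- pv_equiv track=rewrite | github.com/Mire1403/AMP-Comparative-Clustering-and-Motif-Analysis | scripts/05_statistics/02_fimo_reporting_and_robustness.py | count_similar
-- ===== SOURCE A (Python) =====
-- def hamming(s1: str, s2: str) -> int | None:
--     if len(s1) != len(s2):
--         return None
--     return sum(c1 != c2 for c1, c2 in zip(s1, s2))
--
-- def count_similar(set1: list[str], set2: list[str], max_mismatch: int) -> int:
--     matches = 0
--     for s1 in set1:
--         for s2 in set2:
--             d = hamming(s1, s2)
--             if d is not None and d <= max_mismatch:
--                 matches += 1
--                 break
--     return matches
-- ===== SOURCE B (Python) =====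
-- def count_similar(set1, set2, max_mismatch):
--     # Transposed traversal: sweep set2 once, maintaining the worklist of
--     # set1 strings not yet matched; each pass removes newly matched ones.
--     pending = list(set1)
--     matched = 0
--     for s2 in set2:
--         still = []
--         for s1 in pending:
--             if len(s1) == len(s2) and sum(a != b for a, b in zip(s1, s2)) <= max_mismatch:
--                 matched += 1
--             else:
--                 still.append(s1)
--         pending = still
--     return matched
-- ===== Notes on version B (the rewrite author's own statement) =====
-- stated objective: alternative
-- what changed: B transposes the loop nest: it sweeps set2 once in the outer loop, maintaining a shrinking worklist of still-unmatched set1 strings and removing (and counting) each as soon as some set2 string matches it, instead of A's per-set1 inner scan of set2 through an Optional-returning hamming helper.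
import Mathlib
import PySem

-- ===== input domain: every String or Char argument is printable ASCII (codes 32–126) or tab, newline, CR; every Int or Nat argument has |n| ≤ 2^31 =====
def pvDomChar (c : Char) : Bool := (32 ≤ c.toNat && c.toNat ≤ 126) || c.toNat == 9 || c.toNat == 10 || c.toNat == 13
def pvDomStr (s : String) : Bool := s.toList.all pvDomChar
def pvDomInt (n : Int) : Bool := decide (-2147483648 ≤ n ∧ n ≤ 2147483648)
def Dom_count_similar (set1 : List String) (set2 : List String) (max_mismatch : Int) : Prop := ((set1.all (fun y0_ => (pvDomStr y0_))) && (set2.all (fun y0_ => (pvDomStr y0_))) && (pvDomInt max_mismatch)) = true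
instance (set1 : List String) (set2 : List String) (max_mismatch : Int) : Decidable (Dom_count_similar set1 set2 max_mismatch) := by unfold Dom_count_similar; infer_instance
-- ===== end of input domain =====

-- B transposes the loop nest: one sweep over set2 with a shrinking worklist of unmatched set1 strings (objective: alternative algorithm, same cost).

-- ===== PORT A =====
-- hamming: None if lengths differ, else the number of positional mismatches
def hammingA (s1 s2 : String) : Option Int :=
  if s1.toList.length ≠ s2.toList.length then none
  else some ((s1.toList.zip s2.toList).foldl (fun acc p => acc + (if p.1 != p.2 then (1 : Int) else 0)) 0)

-- the inner 'for s2 in set2 … break' loop of A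
def innerA (m : Int) (s1 : String) : List String → Int → Int
  | [], acc => acc
  | s2 :: rest, acc =>
    match hammingA s1 s2 with
    | some d => if d ≤ m then acc + 1 else innerA m s1 rest acc
    | none => innerA m s1 rest acc

def count_similar (set1 : List String) (set2 : List String) (max_mismatch : Int) : Int :=
  set1.foldl (fun acc s1 => innerA max_mismatch s1 set2 acc) 0

-- ===== PORT B =====
def slenB (s : String) : Int := s.toList.length

-- positional mismatch count of two strings (over the zipped prefix)
def mismB (s1 c : String) : Int :=
  (s1.toList.zip c.toList).foldl (fun acc p => acc + (if p.1 != p.2 then (1 : Int) else 0)) 0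

-- one pass over the pending worklist for a fixed s2: (still-unmatched, matched-so-far)
def passB (m : Int) (s2 : String) (pending : List String) (st : List String × Int) : List String × Int :=
  pending.foldl
    (fun st s1 =>
      if slenB s1 == slenB s2 && decide (mismB s1 s2 ≤ m) then (st.1, st.2 + 1)
      else (st.1 ++ [s1], st.2))
    st

def count_similar_alt (set1 : List String) (set2 : List String) (max_mismatch : Int) : Int :=
  (set2.foldl (fun st s2 => passB max_mismatch s2 st.1 ([], st.2)) (set1, 0)).2

-- ===== PRECONDITION & SPEC =====
def Spec_count_similar (set1 : List String) (set2 : List String) (max_mismatch : Int) (out : Int) : Prop := out = count_similar_alt set1 set2 max_mismatch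
instance (set1 : List String) (set2 : List String) (max_mismatch : Int) (out : Int) : Decidable (Spec_count_similar set1 set2 max_mismatch out) := by unfold Spec_count_similar; infer_instance

-- ===== CLAIM (what is proved, stated in full; the proofs are below) =====
def Claim_equal_count_similar : Prop := ∀ (set1 : List String) (set2 : List String) (max_mismatch : Int), Dom_count_similar set1 set2 max_mismatch → Spec_count_similar set1 set2 max_mismatch (count_similar set1 set2 max_mismatch)

-- ===== LEMMAS AND PROOFS =====
def matchP (m : Int) (s1 s2 : String) : Bool :=
  slenB s1 == slenB s2 && decide (mismB s1 s2 ≤ m)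

theorem hammingA_eq (s1 s2 : String) :
    hammingA s1 s2 = if slenB s1 == slenB s2 then some (mismB s1 s2) else none := by
  unfold hammingA mismB slenB
  simp

theorem innerA_eq (m : Int) (s1 : String) (l : List String) (acc : Int) :
    innerA m s1 l acc = if l.any (matchP m s1) then acc + 1 else acc := by
  induction l with
  | nil => simp [innerA]
  | cons s2 rest ih =>
    rw [innerA, hammingA_eq]
    by_cases hl : slenB s1 = slenB s2
    · by_cases hd : mismB s1 s2 ≤ m
      · simp [matchP, hl, hd]
      · simp [matchP, hl, hd, ih]
    · simp [matchP, hl, ih]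

theorem countA_eq (m : Int) (set2 : List String) (l : List String) (acc : Int) :
    l.foldl (fun acc s1 => innerA m s1 set2 acc) acc =
      acc + l.countP (fun s1 => set2.any (matchP m s1)) := by
  induction l generalizing acc with
  | nil => simp
  | cons s1 rest ih =>
    rw [List.foldl_cons, ih, innerA_eq, List.countP_cons]
    by_cases h : set2.any (matchP m s1) = true
    · simp [h]; omega
    · simp [h]

theorem passB_eq (m : Int) (s2 : String) (pending : List String) (acc : List String) (c : Int) :
    passB m s2 pending (acc, c) =
      (acc ++ pending.filter (fun s1 => !matchP m s1 s2),
       c + pending.countP (fun s1 => matchP m s1 s2)) := by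
  induction pending generalizing acc c with
  | nil => simp [passB]
  | cons s1 rest ih =>
    have hstep : passB m s2 (s1 :: rest) (acc, c) =
        passB m s2 rest (if matchP m s1 s2 = true then (acc, c + 1) else (acc ++ [s1], c)) := by
      unfold passB matchP
      rw [List.foldl_cons]
    rw [hstep]
    by_cases h : matchP m s1 s2 = true
    · rw [if_pos h, ih, List.filter_cons, List.countP_cons]
      simp [h]; omega
    · rw [if_neg h, ih, List.filter_cons, List.countP_cons]
      simp [h]

theorem countP_or_split (P : List String) (a b : String → Bool) :
    P.countP (fun x => a x || b x) =
      P.countP a + (P.filter (fun x => !a x)).countP b := by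
  induction P with
  | nil => simp
  | cons x rest ih =>
    rw [List.countP_cons, List.countP_cons, List.filter_cons]
    by_cases h : a x = true
    · simp [h, ih]; omega
    · simp only [Bool.not_eq_true] at h
      by_cases h2 : b x = true
      · simp [h, h2, ih]; omega
      · simp [h, h2, ih]

theorem sweepB_eq (m : Int) (l : List String) (P : List String) (c : Int) :
    (l.foldl (fun st s2 => passB m s2 st.1 ([], st.2)) (P, c)).2 =
      c + P.countP (fun s1 => l.any (fun s2 => matchP m s1 s2)) := by
  induction l generalizing P c with
  | nil => simp
  | cons s2 rest ih =>
    rw [List.foldl_cons]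
    rw [show passB m s2 (P, c).1 ([], (P, c).2) = passB m s2 P ([], c) from rfl]
    rw [passB_eq, List.nil_append, ih]
    have := countP_or_split P (fun s1 => matchP m s1 s2)
      (fun s1 => rest.any (fun s2 => matchP m s1 s2))
    simp only [List.any_cons]
    omega

-- ===== VERDICT (by name: the statement is the Claim_ definition above) =====
theorem count_similar_spec : Claim_equal_count_similar := by
  intro set1 set2 m _
  unfold Spec_count_similar count_similar count_similar_alt
  rw [countA_eq, sweepB_eq]
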